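-- pv_equiv track=rewrite | github.com/MrBrantCode/unitest_baseline | mut_generate/mist_train_cf/cf_71678/solution.py | get_factorials_and_prime_factors
-- ===== SOURCE A (Python) =====
-- def get_factorials_and_prime_factors(n):
--     def factorial(m):
--         if m == 0:
--             return 1
--         else:
--             return m * factorial(m-1)
--
--     def prime_factors(m):
--         i = 2
--         factors = []
--         while i * i <= m:
--             if m % i:
--                 i += 1
--             else:
--                 m //= i
--                 factors.append(i)
--         if m > 1:
--             factors.append(m)
--         return factors
--
--     result = []
--     for i in range(1, n+1):
--         f = factorial(i)
--         factors = prime_factors(f)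
--         result.append((i, f, factors))
--     return result
-- ===== SOURCE B (Python) =====
-- def get_factorials_and_prime_factors(n):
--     # Incremental factorial + factor only i (not i!) each step; merge into a
--     # running multiset of prime factors and emit it sorted.
--     def _spf(m):
--         # smallest prime factor of m >= 2
--         if m % 2 == 0:
--             return 2
--         d = 3
--         while d * d <= m:
--             if m % d == 0:
--                 return d
--             d += 2
--         return m
--
--     def _factor(m):
--         out = []
--         while m > 1:
--             p = _spf(m)
--             out.append(p)
--             m //= p
--         return out
--
--     f = 1
--     acc = []
--     result = []
--     for i in range(1, n + 1):
--         f *= i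
--         acc.extend(_factor(i))
--         result.append((i, f, sorted(acc)))
--     return result
-- ===== Notes on version B (the rewrite author's own statement) =====
-- stated objective: faster
-- what changed: Instead of recomputing each factorial recursively and trial-dividing the huge number i!, B keeps a running product for i! and a running multiset of prime factors obtained by factoring only i each step, emitting it sorted.
import Mathlib
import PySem

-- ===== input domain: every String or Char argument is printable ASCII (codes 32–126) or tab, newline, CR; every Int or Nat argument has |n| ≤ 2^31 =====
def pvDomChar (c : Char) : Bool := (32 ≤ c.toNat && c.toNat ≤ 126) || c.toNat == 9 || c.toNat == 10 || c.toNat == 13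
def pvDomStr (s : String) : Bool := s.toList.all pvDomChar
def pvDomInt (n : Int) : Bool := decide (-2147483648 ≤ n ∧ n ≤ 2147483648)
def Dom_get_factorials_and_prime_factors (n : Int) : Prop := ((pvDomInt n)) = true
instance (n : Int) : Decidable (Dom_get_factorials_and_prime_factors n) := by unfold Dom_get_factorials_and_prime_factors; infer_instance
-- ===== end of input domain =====

-- B replaces A's per-i recursive factorial and trial division of the huge number i!
-- by a running product for i! and a running multiset of prime factors (factoring only i
-- each step, emitted sorted); objective: faster.


-- ===== PORT A =====
-- A's inner recursive `factorial`; the `m < 0` branch is only a totality guard for the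
-- Lean recursion (A calls it with m ≥ 1 only, where that branch is never taken).
-- `fuel` only makes the recursion structural; it is chosen below so that it is
-- never exhausted on the calls A makes (m ≥ 1).
def pvFactAGo (fuel : Nat) (m : Int) : Int :=
  match fuel with
  | 0 => 1
  | fuel + 1 => if m = 0 then 1 else m * pvFactAGo fuel (m - 1)

def pvFactA (m : Int) : Int := pvFactAGo (m.toNat + 1) m

-- A's `prime_factors` while-loop; `fuel` is only a totality device, chosen large enough
-- below that it is never exhausted on the actual call.
def pvPFLoopA (fuel : Nat) (i m : Int) (factors : List Int) : List Int :=
  match fuel with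
  | 0 => factors
  | fuel + 1 =>
    if i * i ≤ m then
      if PySem.Int.mod m i ≠ 0 then pvPFLoopA fuel (i + 1) m factors
      else pvPFLoopA fuel i (PySem.Int.floordiv m i) (factors ++ [i])
    else if m > 1 then factors ++ [m] else factors

def pvPrimeFactorsA (m : Int) : List Int :=
  pvPFLoopA (2 * m.toNat + 2) 2 m []

def get_factorials_and_prime_factors (n : Int) : List (Int × Int × List Int) :=
  (PySem.List.pyRange 1 (n + 1) 1).foldl
    (fun result i =>
      let f := pvFactA i
      let factors := pvPrimeFactorsA f
      result ++ [(i, f, factors)]) []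

-- ===== PORT B =====
-- B's `_spf` while-loop (odd trial divisors); `fuel` only makes it structural and is
-- chosen large enough at the call site that it is never exhausted.
def pvSpfLoopGo (fuel : Nat) (m d : Int) : Int :=
  match fuel with
  | 0 => m
  | fuel + 1 =>
    if d * d ≤ m then
      if PySem.Int.mod m d = 0 then d else pvSpfLoopGo fuel m (d + 2)
    else m

def pvSpf (m : Int) : Int :=
  if PySem.Int.mod m 2 = 0 then 2 else pvSpfLoopGo (m.toNat + 2) m 3

-- B's `_factor` while-loop; `fuel` again only makes it structural.
def pvFactorLoopGo (fuel : Nat) (m : Int) (out : List Int) : List Int :=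
  match fuel with
  | 0 => out
  | fuel + 1 =>
    if m > 1 then
      let p := pvSpf m
      pvFactorLoopGo fuel (PySem.Int.floordiv m p) (out ++ [p])
    else out

def pvFactorLoop (m : Int) (out : List Int) : List Int :=
  pvFactorLoopGo (m.toNat + 1) m out

def get_factorials_and_prime_factors_alt (n : Int) : List (Int × Int × List Int) :=
  ((PySem.List.pyRange 1 (n + 1) 1).foldl
    (fun (st : Int × List Int × List (Int × Int × List Int)) i =>
      let f := st.1 * i
      let acc := st.2.1 ++ pvFactorLoop i []
      (f, acc, st.2.2 ++ [(i, f, PySem.List.sorted acc (fun x => x) false)]))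
    (1, [], [])).2.2

-- ===== PRECONDITION & SPEC =====
def Spec_get_factorials_and_prime_factors (n : Int) (out : List (Int × Int × List Int)) : Prop := out = get_factorials_and_prime_factors_alt n
instance (n : Int) (out : List (Int × Int × List Int)) : Decidable (Spec_get_factorials_and_prime_factors n out) := by unfold Spec_get_factorials_and_prime_factors; infer_instance

-- ===== CLAIM (what is proved, stated in full; the proofs are below) =====
def Claim_equal_get_factorials_and_prime_factors : Prop := ∀ (n : Int), Dom_get_factorials_and_prime_factors n → Spec_get_factorials_and_prime_factors n (get_factorials_and_prime_factors n)

-- ===== LEMMAS AND PROOFS =====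

-- the common reference value: entry k is (k+1, (k+1)!, prime factors of (k+1)! ascending)
def pvRef (N : Nat) : List (Int × Int × List Int) :=
  (List.range N).map (fun k =>
    (((k + 1 : Nat) : Int), (((k + 1).factorial : Nat) : Int),
      (Nat.primeFactorsList (k + 1).factorial).map (fun p : Nat => (p : Int))))

theorem pvFactAGo_eq : ∀ (fuel k : Nat), k < fuel →
    pvFactAGo fuel (k : Int) = ((k.factorial : Nat) : Int) := by
  intro fuel
  induction fuel with
  | zero => intro k hk; omega
  | succ fuel ih =>
    intro k hk
    rw [pvFactAGo]
    match k with
    | 0 => norm_num [Nat.factorial]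
    | k + 1 =>
      have h1 : ¬((k + 1 : Nat) : Int) = 0 := by omega
      rw [if_neg h1]
      have h3 : ((k + 1 : Nat) : Int) - 1 = (k : Int) := by push_cast; ring
      rw [h3, ih k (by omega), Nat.factorial_succ]
      push_cast
      ring

theorem pvFactA_natCast (k : Nat) : pvFactA (k : Int) = ((k.factorial : Nat) : Int) := by
  unfold pvFactA
  rw [Int.toNat_natCast]
  exact pvFactAGo_eq (k + 1) k (by omega)

-- A's loop, on a state with no divisor below i, produces the prime factorisation
theorem pvPFLoopA_eq : ∀ (fuel : Nat) (i M : Nat) (factors : List Int),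
    2 ≤ i → 1 ≤ M → (∀ d : Nat, 2 ≤ d → d < i → ¬ d ∣ M) →
    M + (M + 1 - i) < fuel →
    pvPFLoopA fuel (i : Int) (M : Int) factors
      = factors ++ (Nat.primeFactorsList M).map (fun p : Nat => (p : Int)) := by
  intro fuel
  induction fuel with
  | zero => intro i M factors _ _ _ hf; omega
  | succ fuel ih =>
    intro i M factors hi hM hinv hf
    have hiile : i ≤ i * i := Nat.le_mul_of_pos_left i (by omega)
    rw [pvPFLoopA]
    by_cases hle : i * i ≤ M
    · have hle' : ((i : Int) * i ≤ (M : Int)) := by exact_mod_cast hle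
      have hiM : i ≤ M := le_trans hiile hle
      rw [if_pos hle', PySem.Int.mod_natCast]
      by_cases hdvd : i ∣ M
      · have hmod0 : M % i = 0 := Nat.mod_eq_zero_of_dvd hdvd
        rw [hmod0]
        simp only [Nat.cast_zero, ne_eq, not_true_eq_false, if_false]
        rw [PySem.Int.floordiv_natCast]
        have hM2 : 2 ≤ M := le_trans hi (Nat.le_of_dvd (by omega) hdvd)
        have hmf : M.minFac = i := by
          refine le_antisymm (Nat.minFac_le_of_dvd (by omega) hdvd) ?_
          by_contra h
          push Not at h
          exact hinv M.minFac (Nat.minFac_prime (by omega)).two_le h (Nat.minFac_dvd M)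
        have hpfl : Nat.primeFactorsList M = i :: Nat.primeFactorsList (M / i) := by
          obtain ⟨k, rfl⟩ : ∃ k, M = k + 2 := ⟨M - 2, by omega⟩
          rw [Nat.primeFactorsList]
          simp [hmf]
        have hrec := ih i (M / i) (factors ++ [(i : Int)]) hi
          (Nat.div_pos hiM (by omega))
          (fun d h2 hlt hd => hinv d h2 hlt (hd.trans (Nat.div_dvd_of_dvd hdvd)))
          (by have := Nat.div_lt_self (show 0 < M by omega) (show 1 < i by omega); omega)
        rw [hrec, hpfl]
        simp
      · have hmodne : M % i ≠ 0 := fun h => hdvd (Nat.dvd_of_mod_eq_zero h)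
        have hmodne' : ((M % i : Nat) : Int) ≠ 0 := by exact_mod_cast hmodne
        rw [if_pos hmodne']
        have hcast : ((i : Int) + 1) = ((i + 1 : Nat) : Int) := by push_cast; ring
        rw [hcast]
        refine ih (i + 1) M factors (by omega) hM ?_ (by omega)
        intro d h2 hlt hd
        rcases Nat.lt_succ_iff_lt_or_eq.1 hlt with h | h
        · exact hinv d h2 h hd
        · subst h; exact hdvd hd
    · have hle' : ¬ ((i : Int) * i ≤ (M : Int)) := by exact_mod_cast hle
      rw [if_neg hle']
      by_cases h1 : M = 1
      · subst h1; norm_num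
      · have hM2 : 2 ≤ M := by omega
        have hp : Nat.Prime M := by
          by_contra hnp
          have hs := Nat.minFac_sq_le_self (show 0 < M by omega) hnp
          have h2 : i ≤ M.minFac := by
            by_contra h
            push Not at h
            exact hinv M.minFac (Nat.minFac_prime (by omega)).two_le h (Nat.minFac_dvd M)
          have h3 : i * i ≤ M.minFac * M.minFac := Nat.mul_le_mul h2 h2
          rw [pow_two] at hs
          omega
        rw [Nat.primeFactorsList_prime hp]
        have : ((M : Int) > 1) := by exact_mod_cast hM2
        rw [if_pos this]
        simp

theorem pvPrimeFactorsA_eq (M : Nat) (h : 1 ≤ M) :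
    pvPrimeFactorsA (M : Int)
      = (Nat.primeFactorsList M).map (fun p : Nat => (p : Int)) := by
  unfold pvPrimeFactorsA
  have ht : ((M : Int)).toNat = M := Int.toNat_natCast M
  rw [ht]
  have h2 : ((2 : Nat) : Int) = (2 : Int) := by norm_num
  rw [← h2]
  rw [pvPFLoopA_eq (2 * M + 2) 2 M [] (by omega) h (by intro d hd hlt; omega) (by omega)]
  simp

theorem pvA_eq_ref (n : Int) : get_factorials_and_prime_factors n = pvRef n.toNat := by
  unfold get_factorials_and_prime_factors pvRef
  rw [PySem.List.foldl_append_singleton_eq_map, PySem.List.pyRange_one]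
  have h1 : (n + 1 - 1).toNat = n.toNat := by omega
  rw [h1]
  simp only [List.nil_append, List.map_map]
  apply List.map_congr_left
  intro k _
  simp only [Function.comp]
  have hc : (1 : Int) + (k : Int) = ((k + 1 : Nat) : Int) := by push_cast; ring
  rw [hc, pvFactA_natCast, pvPrimeFactorsA_eq (k + 1).factorial (Nat.factorial_pos _)]

-- B's `_spf` loop is Mathlib's `Nat.minFacAux`
theorem pvSpfLoopGo_eq : ∀ (fuel : Nat) (M d : Nat), 1 ≤ d → M + 2 - d ≤ fuel →
    pvSpfLoopGo fuel (M : Int) (d : Int) = ((Nat.minFacAux M d : Nat) : Int) := by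
  intro fuel
  induction fuel with
  | zero =>
    intro M d hd hf
    have hMd : M < d * d := lt_of_lt_of_le (by omega) (Nat.le_mul_of_pos_left d (by omega))
    rw [pvSpfLoopGo, Nat.minFacAux, if_pos hMd]
  | succ fuel ih =>
    intro M d hd hf
    rw [pvSpfLoopGo]
    by_cases hdd : d * d ≤ M
    · have hdd' : ((d : Int) * d ≤ (M : Int)) := by exact_mod_cast hdd
      rw [if_pos hdd', Nat.minFacAux, if_neg (Nat.not_lt.2 hdd),
        PySem.Int.mod_natCast]
      by_cases hdvd : d ∣ M
      · rw [Nat.mod_eq_zero_of_dvd hdvd]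
        simp only [Nat.cast_zero, if_true, if_pos hdvd]
      · have hne : ((M % d : Nat) : Int) ≠ 0 := by
          have : M % d ≠ 0 := fun h => hdvd (Nat.dvd_of_mod_eq_zero h)
          exact_mod_cast this
        rw [if_neg hne, if_neg hdvd]
        have hdM : d ≤ M := le_trans (Nat.le_mul_of_pos_left d (by omega)) hdd
        have hc : ((d : Int) + 2) = ((d + 2 : Nat) : Int) := by push_cast; ring
        rw [hc]
        exact ih M (d + 2) (by omega) (by omega)
    · have hdd' : ¬ ((d : Int) * d ≤ (M : Int)) := by exact_mod_cast hdd
      rw [if_neg hdd', Nat.minFacAux, if_pos (Nat.not_le.1 hdd)]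

theorem pvSpf_eq (M : Nat) : pvSpf (M : Int) = ((Nat.minFac M : Nat) : Int) := by
  unfold pvSpf
  rw [Nat.minFac_eq]
  have hmod : PySem.Int.mod (M : Int) 2 = ((M % 2 : Nat) : Int) := by
    exact_mod_cast PySem.Int.mod_natCast M 2
  by_cases h2 : 2 ∣ M
  · rw [hmod, Nat.mod_eq_zero_of_dvd h2]
    simp only [Nat.cast_zero, if_true, if_pos h2]
    norm_num
  · have hne : ((M % 2 : Nat) : Int) ≠ 0 := by
      have : M % 2 ≠ 0 := fun h => h2 (Nat.dvd_of_mod_eq_zero h)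
      exact_mod_cast this
    rw [hmod, if_neg hne, if_neg h2]
    have hc : (3 : Int) = ((3 : Nat) : Int) := by norm_num
    rw [hc, Int.toNat_natCast]
    exact pvSpfLoopGo_eq (M + 2) M 3 (by omega) (by omega)

theorem pvFactorLoopGo_eq : ∀ (fuel : Nat) (M : Nat) (out : List Int), 1 ≤ M → M ≤ fuel →
    pvFactorLoopGo fuel (M : Int) out
      = out ++ (Nat.primeFactorsList M).map (fun p : Nat => (p : Int)) := by
  intro fuel
  induction fuel with
  | zero => intro M out hM hf; omega
  | succ fuel ih =>
    intro M out hM hf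
    rw [pvFactorLoopGo]
    by_cases h1 : M = 1
    · subst h1
      norm_num
    · have hM2 : 2 ≤ M := by omega
      have hgt : ((1 : Int) < (M : Int)) := by exact_mod_cast hM2
      rw [if_pos hgt]
      simp only []
      rw [pvSpf_eq, PySem.Int.floordiv_natCast]
      have hmfp := Nat.minFac_prime h1
      have hlt : M / M.minFac < M := Nat.div_lt_self (by omega) hmfp.one_lt
      have hrec := ih (M / M.minFac)
        (out ++ [((M.minFac : Nat) : Int)])
        (Nat.div_pos (Nat.minFac_le (by omega)) hmfp.pos)
        (by omega)
      rw [hrec]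
      have hpfl : Nat.primeFactorsList M = M.minFac :: Nat.primeFactorsList (M / M.minFac) := by
        obtain ⟨k, rfl⟩ : ∃ k, M = k + 2 := ⟨M - 2, by omega⟩
        rw [Nat.primeFactorsList]
      rw [hpfl]
      simp

theorem pvFactorLoop_eq (M : Nat) (out : List Int) (hM : 1 ≤ M) :
    pvFactorLoop (M : Int) out
      = out ++ (Nat.primeFactorsList M).map (fun p : Nat => (p : Int)) := by
  unfold pvFactorLoop
  rw [Int.toNat_natCast]
  exact pvFactorLoopGo_eq (M + 1) M out hM (by omega)

-- the accumulated multiset of B after step N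
def pvFlat (N : Nat) : List Nat :=
  (List.range N).flatMap (fun k => Nat.primeFactorsList (k + 1))

theorem pvFlat_perm (N : Nat) :
    (Nat.primeFactorsList N.factorial).Perm (pvFlat N) := by
  induction N with
  | zero => simp [pvFlat, Nat.factorial]
  | succ N ih =>
    have h1 : (N + 1).factorial = N.factorial * (N + 1) := by
      rw [Nat.factorial_succ]; ring
    rw [h1]
    refine (Nat.perm_primeFactorsList_mul (Nat.factorial_ne_zero N) (Nat.succ_ne_zero N)).trans ?_
    unfold pvFlat
    rw [List.range_succ, List.flatMap_append]
    simp only [List.flatMap_cons, List.flatMap_nil, List.append_nil]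
    exact ih.append_right _

theorem pvSortedFlat (N : Nat) :
    PySem.List.sorted ((pvFlat N).map (fun p : Nat => (p : Int))) (fun x => x) false
      = (Nat.primeFactorsList N.factorial).map (fun p : Nat => (p : Int)) := by
  apply PySem.List.sorted_id_eq_of_perm_of_pairwise
  · exact ((pvFlat_perm N).map _)
  · exact ((Nat.primeFactorsList_sorted N.factorial).pairwise).map _
      (fun a b h => by exact_mod_cast h)

theorem pvBFold (N : Nat) :
    (PySem.List.pyRange 1 ((N : Int) + 1) 1).foldl
      (fun (st : Int × List Int × List (Int × Int × List Int)) i =>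
        let f := st.1 * i
        let acc := st.2.1 ++ pvFactorLoop i []
        (f, acc, st.2.2 ++ [(i, f, PySem.List.sorted acc (fun x => x) false)]))
      (1, [], [])
    = (((N.factorial : Nat) : Int), (pvFlat N).map (fun p : Nat => (p : Int)), pvRef N) := by
  induction N with
  | zero =>
    rw [PySem.List.pyRange_one_eq_nil (by norm_num)]
    simp [pvFlat, pvRef, Nat.factorial]
  | succ N ih =>
    have hsplit : PySem.List.pyRange 1 (((N + 1 : Nat) : Int) + 1) 1
        = PySem.List.pyRange 1 ((N : Int) + 1) 1 ++ [(N : Int) + 1] := by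
      have h := PySem.List.pyRange_one_succ_right (a := 1) (b := (N : Int) + 1) (by omega)
      have hc : (((N + 1 : Nat) : Int) + 1) = ((N : Int) + 1) + 1 := by push_cast; ring
      rw [hc, h]
    rw [hsplit, List.foldl_append, ih]
    simp only [List.foldl_cons, List.foldl_nil]
    have hi : ((N : Int) + 1) = ((N + 1 : Nat) : Int) := by push_cast; ring
    rw [hi, pvFactorLoop_eq (N + 1) [] (by omega)]
    have hf : ((N.factorial : Nat) : Int) * ((N + 1 : Nat) : Int) = (((N + 1).factorial : Nat) : Int) := by
      rw [Nat.factorial_succ]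
      push_cast
      ring
    have hacc : (pvFlat N).map (fun p : Nat => (p : Int)) ++ ([] ++ (Nat.primeFactorsList (N + 1)).map (fun p : Nat => (p : Int)))
        = (pvFlat (N + 1)).map (fun p : Nat => (p : Int)) := by
      unfold pvFlat
      rw [List.range_succ, List.flatMap_append, List.map_append]
      simp
    rw [hacc, hf]
    rw [pvSortedFlat (N + 1)]
    have href : pvRef (N + 1) = pvRef N ++ [(((N + 1 : Nat) : Int), (((N + 1).factorial : Nat) : Int), (Nat.primeFactorsList (N + 1).factorial).map (fun p : Nat => (p : Int)))] := by
      unfold pvRef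
      rw [List.range_succ, List.map_append]
      simp
    rw [href]

theorem pvB_eq_ref (n : Int) : get_factorials_and_prime_factors_alt n = pvRef n.toNat := by
  unfold get_factorials_and_prime_factors_alt
  by_cases hn : 0 ≤ n
  · obtain ⟨N, rfl⟩ : ∃ N : Nat, n = (N : Int) := ⟨n.toNat, (Int.toNat_of_nonneg hn).symm⟩
    rw [pvBFold N, Int.toNat_natCast]
  · rw [PySem.List.pyRange_one_eq_nil (by omega)]
    have h0 : n.toNat = 0 := by omega
    rw [h0]
    simp [pvRef]

-- ===== VERDICT (by name: the statement is the Claim_ definition above) =====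
theorem get_factorials_and_prime_factors_spec : Claim_equal_get_factorials_and_prime_factors := by
  intro n _
  unfold Spec_get_factorials_and_prime_factors
  rw [pvA_eq_ref, pvB_eq_ref]
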